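-- pv_equiv track=rewrite | github.com/lasttillend/CS61A | exam/exam_prep3.py | no_eleven
-- ===== SOURCE A (Python) =====
-- def no_eleven(n):
-- 	"""Return a list of lists of 1's and 6's that do not contain 1 after 1."""
-- 	if n == 0:
-- 		return [[]]
-- 	elif n == 1:
-- 		return [[1], [6]]
-- 	else:
-- 		a, b = no_eleven(n - 2), no_eleven(n - 1)
-- 		return [s + [6, 1] for s in a] + [s + [6] for s in b]
-- ===== SOURCE B (Python) =====
-- def no_eleven(n):
--     """Return a list of lists of 1's and 6's that do not contain 1 after 1."""
--     prev2, prev1 = [[]], [[1], [6]]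
--     if n == 0:
--         return prev2
--     for _ in range(n - 1):
--         prev2, prev1 = prev1, [s + [6, 1] for s in prev2] + [s + [6] for s in prev1]
--     return prev1
-- ===== Notes on version B (the rewrite author's own statement) =====
-- stated objective: alternative
-- what changed: Replaces the naive doubly-recursive enumeration (exponentially many repeated subcalls) with a bottom-up dynamic program that keeps only the last two levels and builds each level once; Pre_ excludes negative n, where A's recursion never reaches a base case and raises RecursionError.
-- outside the precondition, e.g. on no_eleven(-1): A raises RecursionError, B returns [[1], [6]]; on no_eleven(-2): A raises RecursionError, B returns [[1], [6]]; on no_eleven(-3): A raises RecursionError, B returns [[1], [6]]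
import Mathlib
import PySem

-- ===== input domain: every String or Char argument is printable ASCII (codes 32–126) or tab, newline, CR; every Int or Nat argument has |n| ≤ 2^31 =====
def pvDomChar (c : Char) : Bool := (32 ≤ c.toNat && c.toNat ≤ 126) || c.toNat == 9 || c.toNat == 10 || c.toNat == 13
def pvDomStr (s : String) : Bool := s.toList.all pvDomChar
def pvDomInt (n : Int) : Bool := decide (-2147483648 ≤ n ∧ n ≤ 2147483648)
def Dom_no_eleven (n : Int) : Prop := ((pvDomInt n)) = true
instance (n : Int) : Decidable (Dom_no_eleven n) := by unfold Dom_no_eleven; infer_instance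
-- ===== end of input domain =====

-- B replaces A's naive double recursion by a bottom-up two-slot DP that builds each level once; return value proved identical on Pre_.


-- ===== PORT A =====
-- A's recursion on the Nat measure (A diverges on n < 0; those inputs are outside Pre_).
def noElevenRecA : Nat → List (List Int)
  | 0 => [[]]
  | 1 => [[1], [6]]
  | (k + 2) =>
      (noElevenRecA k).map (fun s => s ++ [6, 1]) ++
      (noElevenRecA (k + 1)).map (fun s => s ++ [6])

def no_eleven (n : Int) : List (List Int) := noElevenRecA n.toNat

-- ===== PORT B =====
-- one loop iteration: (prev2, prev1) ↦ (prev1, new level)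
def noElevenStepB (p : List (List Int) × List (List Int)) :
    List (List Int) × List (List Int) :=
  (p.2, p.1.map (fun s => s ++ [6, 1]) ++ p.2.map (fun s => s ++ [6]))

def no_eleven_alt (n : Int) : List (List Int) :=
  let init : List (List Int) × List (List Int) := ([[]], [[1], [6]])
  if n == 0 then init.1
  else ((List.range (n - 1).toNat).foldl (fun p _ => noElevenStepB p) init).2

-- ===== PRECONDITION & SPEC =====
-- Pre_ excludes negative n, where Python A recurses without reaching a base case and raises
-- RecursionError, e.g. at n = -1, -2, -3, -4, -5, -10, -100 and -1000; nothing is claimed there.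
def Pre_no_eleven (n : Int) : Prop := 0 ≤ n
instance (n : Int) : Decidable (Pre_no_eleven n) := by unfold Pre_no_eleven; infer_instance
def pvWitness_no_eleven : Int := 3

def Spec_no_eleven (n : Int) (out : List (List Int)) : Prop := out = no_eleven_alt n
instance (n : Int) (out : List (List Int)) : Decidable (Spec_no_eleven n out) := by unfold Spec_no_eleven; infer_instance

-- ===== CLAIM (what is proved, stated in full; the proofs are below) =====
def Claim_equal_no_eleven : Prop := ∀ (n : Int), Dom_no_eleven n → Pre_no_eleven n → Spec_no_eleven n (no_eleven n)

-- ===== LEMMAS AND PROOFS =====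

-- invariant: after k iterations the pair holds levels (k, k+1)
theorem noEleven_foldl_inv (k : Nat) :
    (List.range k).foldl (fun p _ => noElevenStepB p) ([[]], [[1], [6]]) =
      (noElevenRecA k, noElevenRecA (k + 1)) := by
  induction k with
  | zero => simp [noElevenRecA]
  | succ k ih =>
      rw [List.range_succ, List.foldl_append, ih]
      simp [noElevenStepB, noElevenRecA]

-- ===== VERDICT (by name: the statement is the Claim_ definition above) =====
theorem no_eleven_spec : Claim_equal_no_eleven := by
  intro n _ hpre
  unfold Spec_no_eleven no_eleven no_eleven_alt
  by_cases h0 : n = 0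
  · simp [h0, noElevenRecA]
  · have hne : (n == 0) = false := by simp [h0]
    rw [hne]
    simp only [Bool.false_eq_true, if_false]
    rw [noEleven_foldl_inv]
    have hp : 0 ≤ n := hpre
    have h1 : 1 ≤ n := by omega
    have : (n - 1).toNat + 1 = n.toNat := by omega
    rw [this]
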